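-- pv_equiv track=rewrite | github.com/A-nnonymous/warp | runtime/control_plane.py | parse_markdown_sections
-- ===== SOURCE A (Python) =====
-- def slugify(value: str) -> str:
--     normalized = "".join(char.lower() if char.isalnum() else "_" for char in str(value))
--     compact = "_".join(part for part in normalized.split("_") if part)
--     return compact or "unassigned"
--
-- def parse_markdown_sections(text: str) -> tuple[dict[str, str], dict[str, str]]:
--     metadata: dict[str, str] = {}
--     sections: dict[str, list[str]] = {}
--     current_section = ""
--     before_sections = True
--     for raw_line in text.splitlines():
--         line = raw_line.rstrip()
--         if line.startswith("## "):
--             current_section = line[3:].strip().lower()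
--             sections.setdefault(current_section, [])
--             before_sections = False
--             continue
--         if before_sections and line and not line.startswith("#") and ":" in line:
--             key, value = line.split(":", 1)
--             metadata[slugify(key)] = value.strip()
--             continue
--         if current_section:
--             sections.setdefault(current_section, []).append(line)
--     return metadata, {key: "\n".join(value).strip() for key, value in sections.items()}
-- ===== SOURCE B (Python) =====
-- def slugify(value: str) -> str:
--     # accumulate lowered alphanumeric runs directly, joining them with "_"
--     words = []
--     cur = []
--     for ch in str(value):
--         if ch.isalnum():
--             cur.append(ch.lower())
--         elif cur:
--             words.append("".join(cur))
--             cur = []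
--     if cur:
--         words.append("".join(cur))
--     return "_".join(words) or "unassigned"
--
--
-- def parse_markdown_sections(text: str) -> tuple[dict[str, str], dict[str, str]]:
--     lines = [raw.rstrip() for raw in text.splitlines()]
--     # phase 1: consume the preamble (everything before the first '## ' header)
--     metadata: dict[str, str] = {}
--     i = 0
--     while i < len(lines) and not lines[i].startswith("## "):
--         line = lines[i]
--         if line and not line.startswith("#") and ":" in line:
--             key, value = line.split(":", 1)
--             metadata[slugify(key)] = value.strip()
--         i += 1
--     # phase 2: group the remaining lines into sections
--     sections: dict[str, list[str]] = {}
--     current = ""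
--     for line in lines[i:]:
--         if line.startswith("## "):
--             current = line[3:].strip().lower()
--             sections.setdefault(current, [])
--         elif current:
--             sections.setdefault(current, []).append(line)
--     return metadata, {key: "\n".join(value).strip() for key, value in sections.items()}
-- ===== Notes on version B (the rewrite author's own statement) =====
-- stated objective: alternative
-- what changed: Replaces A's single flag-driven loop by a two-phase decomposition (consume the preamble into metadata first, then group the remaining lines into sections) over lines rstripped once up front, and rewrites slugify to accumulate lowered alphanumeric runs directly instead of normalize-then-split-then-join.
import Mathlib
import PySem

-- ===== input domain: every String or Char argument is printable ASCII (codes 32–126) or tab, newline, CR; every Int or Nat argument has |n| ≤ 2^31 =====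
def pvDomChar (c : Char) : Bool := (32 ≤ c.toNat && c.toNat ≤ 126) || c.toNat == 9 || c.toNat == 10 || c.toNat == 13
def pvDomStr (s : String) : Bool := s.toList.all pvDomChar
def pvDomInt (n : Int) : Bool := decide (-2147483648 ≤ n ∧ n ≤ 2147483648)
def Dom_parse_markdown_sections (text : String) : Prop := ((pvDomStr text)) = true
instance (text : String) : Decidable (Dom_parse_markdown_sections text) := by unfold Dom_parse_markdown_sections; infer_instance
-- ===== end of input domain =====

-- B is an alternative decomposition of A: same cost, two explicit phases instead of one flag-driven loop.

-- ===== PORT A =====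
def slugify (value : String) : String :=
  let normalized : List Char :=
    value.toList.map (fun c => if PySem.Chars.isalnum c then PySem.Chars.lowerChar c else '_')
  let compact : List Char :=
    PySem.Chars.join ['_'] ((PySem.Chars.splitOn normalized ['_']).filter (fun part => !part.isEmpty))
  if compact.isEmpty then "unassigned" else String.ofList compact

-- one iteration of A's loop, on the already-rstripped line
def paCore : (PySem.Dict String String × PySem.Dict String (List String) × String × Bool) → String →
    (PySem.Dict String String × PySem.Dict String (List String) × String × Bool)
  | (md, sec, cur, before), line =>
    if PySem.Str.startswith line "## " then
      let c := PySem.Str.lower (PySem.Str.strip (PySem.Str.slice line (some 3) none))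
      (md, sec.setdefault c [], c, false)
    else if before && !(PySem.Str.len line == 0) && !(PySem.Str.startswith line "#")
        && PySem.Str.isIn ":" line then
      match PySem.Str.splitMax? line ":" 1 with
      | some (key :: value :: _) => (md.insert (slugify key) (PySem.Str.strip value), sec, cur, before)
      | _ => (md, sec, cur, before)   -- unreachable: ':' occurs in line, so split has ≥ 2 parts
    else if !(PySem.Str.len cur == 0) then
      (md, sec.modify cur [] (· ++ [line]), cur, before)
    else (md, sec, cur, before)

def paStep (st : PySem.Dict String String × PySem.Dict String (List String) × String × Bool)
    (raw : String) : PySem.Dict String String × PySem.Dict String (List String) × String × Bool :=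
  paCore st (PySem.Str.rstrip raw)

def parse_markdown_sections (text : String) : (List (String × String)) × (List (String × String)) :=
  let st := (PySem.Str.splitlines text).foldl paStep (PySem.Dict.empty, PySem.Dict.empty, "", true)
  (st.1.items, st.2.1.items.map (fun p => (p.1, PySem.Str.strip (PySem.Str.join "\n" p.2))))

-- ===== PORT B =====
-- slugify rewritten: accumulate lowered alphanumeric runs (words) directly
def slugChunks : List Char → List Char → List (List Char)
  | [], cur => if cur.isEmpty then [] else [cur]
  | c :: rest, cur =>
    if PySem.Chars.isalnum c then slugChunks rest (cur ++ [PySem.Chars.lowerChar c])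
    else if cur.isEmpty then slugChunks rest []
    else cur :: slugChunks rest []

def slugify_alt (value : String) : String :=
  let joined := PySem.Chars.join ['_'] (slugChunks value.toList [])
  if joined.isEmpty then "unassigned" else String.ofList joined

-- phase 1: consume preamble lines (before the first '## ' header) into metadata
def consumePre : List String → PySem.Dict String String →
    PySem.Dict String String × List String
  | [], md => (md, [])
  | line :: rest, md =>
    if PySem.Str.startswith line "## " then (md, line :: rest)
    else
      consumePre rest
        (if !(PySem.Str.len line == 0) && !(PySem.Str.startswith line "#")
            && PySem.Str.isIn ":" line then
          match PySem.Str.splitMax? line ":" 1 with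
          | some (key :: value :: _) => md.insert (slugify_alt key) (PySem.Str.strip value)
          | _ => md
        else md)

-- phase 2: one iteration of the section-grouping loop
def pbStep (st : PySem.Dict String (List String) × String) (line : String) :
    PySem.Dict String (List String) × String :=
  if PySem.Str.startswith line "## " then
    let c := PySem.Str.lower (PySem.Str.strip (PySem.Str.slice line (some 3) none))
    (st.1.setdefault c [], c)
  else if !(PySem.Str.len st.2 == 0) then
    (st.1.modify st.2 [] (· ++ [line]), st.2)
  else st

def parse_markdown_sections_alt (text : String) : (List (String × String)) × (List (String × String)) :=
  let lines := (PySem.Str.splitlines text).map PySem.Str.rstrip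
  let pr := consumePre lines PySem.Dict.empty
  let sc := pr.2.foldl pbStep (PySem.Dict.empty, "")
  (pr.1.items, sc.1.items.map (fun p => (p.1, PySem.Str.strip (PySem.Str.join "\n" p.2))))

-- ===== PRECONDITION & SPEC =====
def Spec_parse_markdown_sections (text : String) (out : (List (String × String)) × (List (String × String))) : Prop := out = parse_markdown_sections_alt text
instance (text : String) (out : (List (String × String)) × (List (String × String))) : Decidable (Spec_parse_markdown_sections text out) := by unfold Spec_parse_markdown_sections; infer_instance

-- ===== CLAIM (what is proved, stated in full; the proofs are below) =====
def Claim_equal_parse_markdown_sections : Prop := ∀ (text : String), Dom_parse_markdown_sections text → Spec_parse_markdown_sections text (parse_markdown_sections text)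

-- ===== LEMMAS AND PROOFS =====

-- a lowered alphanumeric character is never '_'
lemma lowerChar_ne_underscore (c : Char) (h : PySem.Chars.isalnum c = true) :
    PySem.Chars.lowerChar c ≠ '_' := by
  have h' : (65 ≤ c.toNat ∧ c.toNat ≤ 90) ∨ (97 ≤ c.toNat ∧ c.toNat ≤ 122)
      ∨ (48 ≤ c.toNat ∧ c.toNat ≤ 57) := by
    simp only [PySem.Chars.isalnum, PySem.Chars.isalpha, PySem.Chars.isdigit,
      PySem.Chars.isupper, PySem.Chars.islower, Bool.or_eq_true, Bool.and_eq_true,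
      decide_eq_true_eq, Char.le_def, UInt32.le_iff_toNat_le] at h
    rcases h with (⟨h1, h2⟩ | ⟨h1, h2⟩) | ⟨h1, h2⟩
    · exact Or.inl ⟨h1, h2⟩
    · exact Or.inr (Or.inl ⟨h1, h2⟩)
    · exact Or.inr (Or.inr ⟨h1, h2⟩)
  intro he
  unfold PySem.Chars.lowerChar at he
  split_ifs at he with hu
  · have h95 := congrArg Char.toNat he
    rw [Char.toNat_ofNat, if_pos (Or.inl (by omega : c.toNat + 32 < 0xD800))] at h95
    have : ('_').toNat = 95 := by decide
    omega
  · have h95 := congrArg Char.toNat he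
    have : ('_').toNat = 95 := by decide
    omega

-- one-step unfoldings of PySem.Chars.splitOn.go
lemma go_nil (fuel : Nat) (cur : List Char) (acc : List (List Char)) :
    PySem.Chars.splitOn.go ['_'] (fuel + 1) [] cur acc = (cur.reverse :: acc).reverse := rfl

lemma go_cons (fuel : Nat) (x : Char) (xs cur : List Char) (acc : List (List Char)) :
    PySem.Chars.splitOn.go ['_'] (fuel + 1) (x :: xs) cur acc
      = if ['_'].isPrefixOf (x :: xs)
        then PySem.Chars.splitOn.go ['_'] fuel (List.drop 1 (x :: xs)) [] (cur.reverse :: acc)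
        else PySem.Chars.splitOn.go ['_'] fuel xs (x :: cur) acc := rfl

-- splitting the normalized string on '_' and keeping the nonempty parts is slugChunks
lemma go_filter (cs : List Char) : ∀ (fuel : Nat) (cur : List Char) (acc : List (List Char)),
    cs.length < fuel →
    (PySem.Chars.splitOn.go ['_'] fuel
        (cs.map (fun c => if PySem.Chars.isalnum c then PySem.Chars.lowerChar c else '_'))
        cur acc).filter (fun part => !part.isEmpty)
      = acc.reverse.filter (fun part => !part.isEmpty) ++ slugChunks cs cur.reverse := by
  induction cs with
  | nil =>
    intro fuel cur acc hf
    match fuel, hf with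
    | fuel + 1, _ =>
      rw [List.map_nil, go_nil, List.reverse_cons, List.filter_append]
      simp only [slugChunks, List.filter]
      by_cases hc : cur.reverse.isEmpty
      · simp [hc]
      · simp [hc]
  | cons c rest ih =>
    intro fuel cur acc hf
    match fuel, hf with
    | fuel + 1, hf' =>
      have hlen : (rest.map (fun c => if PySem.Chars.isalnum c then PySem.Chars.lowerChar c else '_')).length < fuel := by
        simp only [List.length_map]
        simpa using Nat.lt_of_succ_lt_succ hf'
      rw [List.map_cons, go_cons]
      by_cases ha : PySem.Chars.isalnum c = true
      · rw [if_pos ha]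
        rw [if_neg (by
          simp only [List.isPrefixOf, Bool.and_eq_true, beq_iff_eq]
          intro hcontra
          exact lowerChar_ne_underscore c ha hcontra.1.symm)]
        rw [show PySem.Chars.lowerChar c :: cur
            = ((cur.reverse ++ [PySem.Chars.lowerChar c]).reverse : List Char) from by simp]
        rw [ih fuel _ acc (by simpa using hlen)]
        simp only [List.reverse_reverse, slugChunks, ha, if_pos]
      · rw [if_neg ha]
        rw [if_pos (by simp [List.isPrefixOf])]
        simp only [List.drop_one, List.tail_cons]
        rw [ih fuel [] (cur.reverse :: acc) (by simpa using hlen)]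
        rw [List.reverse_cons, List.filter_append, List.reverse_nil]
        simp only [slugChunks, ha, List.filter]
        by_cases hc : cur.reverse.isEmpty
        · simp [hc]
        · simp [hc]

lemma slugify_eq (s : String) : slugify s = slugify_alt s := by
  unfold slugify slugify_alt PySem.Chars.splitOn
  dsimp only
  rw [go_filter s.toList
      ((s.toList.map (fun c => if PySem.Chars.isalnum c then PySem.Chars.lowerChar c else '_')).length + 1)
      [] [] (by simp)]
  rfl

-- after the first header A's loop is exactly B's phase-2 loop
lemma foldl_paCore_after (ls : List String) :
    ∀ (md : PySem.Dict String String) (sec : PySem.Dict String (List String)) (cur : String),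
    ls.foldl paCore (md, sec, cur, false)
      = (md, (ls.foldl pbStep (sec, cur)).1, (ls.foldl pbStep (sec, cur)).2, false) := by
  induction ls with
  | nil => intro md sec cur; rfl
  | cons l ls ih =>
    intro md sec cur
    simp only [List.foldl_cons]
    rw [show paCore (md, sec, cur, false) l
        = ((md, (pbStep (sec, cur) l).1, (pbStep (sec, cur) l).2, false) :
            PySem.Dict String String × PySem.Dict String (List String) × String × Bool) from ?_]
    · exact ih md _ _
    · simp only [paCore, pbStep, Bool.false_and]
      split_ifs <;> first | rfl | contradiction

-- the whole loop: preamble phase (metadata) then section phase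
lemma foldl_paCore_pre (ls : List String) :
    ∀ (md : PySem.Dict String String) (sec : PySem.Dict String (List String)),
    ((ls.foldl paCore (md, sec, "", true)).1,
     (ls.foldl paCore (md, sec, "", true)).2.1)
      = ((consumePre ls md).1,
         (((consumePre ls md).2).foldl pbStep (sec, "")).1) := by
  induction ls with
  | nil => intro md sec; rfl
  | cons l ls ih =>
    intro md sec
    by_cases hh : PySem.Str.startswith l "## " = true
    · -- header line: consumePre stops; A's step enters the after-header phase
      have hcp : consumePre (l :: ls) md = (md, l :: ls) := by
        rw [consumePre, if_pos hh]
      have hpa : paCore (md, sec, "", true) l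
          = (md, (pbStep (sec, "") l).1, (pbStep (sec, "") l).2, false) := by
        simp only [paCore, pbStep]
        rw [if_pos hh, if_pos hh]
      rw [hcp, List.foldl_cons, hpa, foldl_paCore_after]
      rfl
    · -- preamble line: only metadata can change, section state is untouched
      have hslug : slugify = slugify_alt := funext slugify_eq
      set md' := (if (!(PySem.Str.len l == 0) && !(PySem.Str.startswith l "#")
            && PySem.Str.isIn ":" l) then
          match PySem.Str.splitMax? l ":" 1 with
          | some (key :: value :: _) => md.insert (slugify_alt key) (PySem.Str.strip value)
          | _ => md
        else md) with hmd'
      have hcp : consumePre (l :: ls) md = consumePre ls md' := by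
        rw [consumePre, if_neg hh]
      have hpa : paCore (md, sec, "", true) l = (md', sec, "", true) := by
        simp only [paCore]
        rw [if_neg hh, hmd', hslug]
        simp only [Bool.true_and]
        by_cases hc : (!(PySem.Str.len l == 0) && !(PySem.Str.startswith l "#")
            && PySem.Str.isIn ":" l) = true
        · rw [if_pos hc, if_pos hc]
          cases PySem.Str.splitMax? l ":" 1 with
          | none => rfl
          | some parts =>
            match parts with
            | [] => rfl
            | [k] => rfl
            | k :: v :: t => rfl
        · rw [if_neg hc, if_neg hc,
            if_neg (show ¬ (!(PySem.Str.len ("" : String) == 0)) = true by decide)]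
      rw [hcp, List.foldl_cons, hpa]
      exact ih md' sec

-- ===== VERDICT (by name: the statement is the Claim_ definition above) =====
theorem parse_markdown_sections_spec : Claim_equal_parse_markdown_sections := by
  intro text _
  unfold Spec_parse_markdown_sections parse_markdown_sections parse_markdown_sections_alt
  have hmap : (PySem.Str.splitlines text).foldl paStep (PySem.Dict.empty, PySem.Dict.empty, "", true)
      = ((PySem.Str.splitlines text).map PySem.Str.rstrip).foldl paCore
          (PySem.Dict.empty, PySem.Dict.empty, "", true) := by
    rw [List.foldl_map]; rfl
  have h := foldl_paCore_pre ((PySem.Str.splitlines text).map PySem.Str.rstrip)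
      PySem.Dict.empty PySem.Dict.empty
  rw [hmap]
  dsimp only
  rw [Prod.mk.injEq] at h
  rw [h.1, h.2]
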